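-- pv_equiv track=rewrite | github.com/miguelclsouto/FEUP-L.EIC | Fundamentos da Programação/QPs/QP5/exercise2.py | camel_case
-- ===== SOURCE A (Python) =====
-- def camel_case(phrase):
--     newstring = ""
--
--     upper = False
--
--     for i in range(0, len(phrase)):
--
--         if phrase[i].isalpha():
--
--             if upper:
--
--                 newstring += phrase[i].upper()
--                 upper = False
--                 continue # next iteration
--
--             newstring += phrase[i].lower()
--
--         else:
--             upper = True
--
--     finalstring = ""
--
--     finalstring += newstring[0].lower()
--
--     finalstring += newstring[1:]
--
--
--     return finalstring
-- ===== SOURCE B (Python) =====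
-- from itertools import groupby
--
-- def camel_case(phrase):
--     words = [''.join(g) for isword, g in groupby(phrase, str.isalpha) if isword]
--     result = ''.join(w[0].upper() + w[1:].lower() for w in words)
--     # like the original, a phrase with no letters raises IndexError here
--     return result[0].lower() + result[1:]
-- ===== Notes on version B (the rewrite author's own statement) =====
-- stated objective: faster
-- what changed: Replaced the char-by-char loop with a boolean flag and per-character string concatenation by a partition of the phrase into alpha runs via itertools.groupby, capitalizing each run and joining once, then lowering the first character.
import Mathlib
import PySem

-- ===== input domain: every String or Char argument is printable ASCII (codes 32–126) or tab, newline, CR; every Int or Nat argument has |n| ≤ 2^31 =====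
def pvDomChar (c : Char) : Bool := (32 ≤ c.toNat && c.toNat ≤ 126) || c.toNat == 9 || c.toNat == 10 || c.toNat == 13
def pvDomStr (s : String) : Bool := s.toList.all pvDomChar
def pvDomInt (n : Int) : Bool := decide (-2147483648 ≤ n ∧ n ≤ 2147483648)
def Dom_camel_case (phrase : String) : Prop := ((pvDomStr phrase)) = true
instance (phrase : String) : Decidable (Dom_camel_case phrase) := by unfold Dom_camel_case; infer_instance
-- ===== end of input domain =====

-- B replaces A's char-by-char scan with an upper-flag by partition-into-alpha-runs,
-- capitalize-each-run-and-join, then lower the first character (objective: idiomatic).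

-- ===== PORT A =====
-- literal port of A: index loop over range(0, len(phrase)) with an 'upper' flag,
-- appending one char at a time; then finalstring = newstring[0].lower() + newstring[1:]
def camel_case (phrase : String) : String :=
  let cs := phrase.toList
  let ns := ((PySem.List.pyRange 0 (cs.length : Int) 1).foldl
    (fun (st : List Char × Bool) i =>
      let c := PySem.List.pyGetD cs i ' '
      if PySem.Chars.isalpha c then
        if st.2 then (st.1 ++ [PySem.Chars.upperChar c], false)
        else (st.1 ++ [PySem.Chars.lowerChar c], false)
      else (st.1, true)) (([] : List Char), false)).1
  match PySem.List.pyGet? ns 0 with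
  | none => ""   -- Python raises IndexError here (no letters); excluded by Pre_
  | some c => String.ofList (PySem.Chars.lowerChar c :: PySem.List.slice ns (some 1) none)

-- ===== PORT B =====
-- groupby(phrase, str.isalpha) keeping only the alpha runs (Source B's list comprehension)
def pvWordsB : List Char → List (List Char)
  | [] => []
  | c :: cs =>
    if PySem.Chars.isalpha c then
      (c :: cs.takeWhile PySem.Chars.isalpha) :: pvWordsB (cs.dropWhile PySem.Chars.isalpha)
    else pvWordsB cs
  termination_by cs => cs.length
  decreasing_by
    · have := List.length_dropWhile_le PySem.Chars.isalpha cs; simp; omega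
    · simp

-- w[0].upper() + w[1:].lower()
def pvCap : List Char → List Char
  | [] => []
  | c :: r => PySem.Chars.upperChar c :: r.map PySem.Chars.lowerChar

def camel_case_alt (phrase : String) : String :=
  let res := (pvWordsB phrase.toList).flatMap pvCap
  match PySem.List.pyGet? res 0 with
  | none => ""   -- Python raises IndexError here (no letters); excluded by Pre_
  | some c => String.ofList (PySem.Chars.lowerChar c :: PySem.List.slice res (some 1) none)

-- ===== PRECONDITION & SPEC =====
-- Pre_ excludes exactly the phrases with no letter, on which the Python A raises IndexError.
def Pre_camel_case (phrase : String) : Prop := phrase.toList.any PySem.Chars.isalpha = true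
instance (phrase : String) : Decidable (Pre_camel_case phrase) := by unfold Pre_camel_case; infer_instance
def pvWitness_camel_case : String := "hello world"

def Spec_camel_case (phrase : String) (out : String) : Prop := out = camel_case_alt phrase
instance (phrase : String) (out : String) : Decidable (Spec_camel_case phrase out) := by unfold Spec_camel_case; infer_instance

-- ===== CLAIM (what is proved, stated in full; the proofs are below) =====
def Claim_equal_camel_case : Prop := ∀ (phrase : String), Dom_camel_case phrase → Pre_camel_case phrase → Spec_camel_case phrase (camel_case phrase)

-- ===== LEMMAS AND PROOFS =====

-- the loop body of A, as a function of the current character (proof-side name)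
def pvStepA (st : List Char × Bool) (c : Char) : List Char × Bool :=
  if PySem.Chars.isalpha c then
    if st.2 then (st.1 ++ [PySem.Chars.upperChar c], false)
    else (st.1 ++ [PySem.Chars.lowerChar c], false)
  else (st.1, true)

-- A's newstring as a structural recursion (what the foldl computes)
def pvRunA : Bool → List Char → List Char
  | _, [] => []
  | u, c :: cs =>
    if PySem.Chars.isalpha c then
      (if u then PySem.Chars.upperChar c else PySem.Chars.lowerChar c) :: pvRunA false cs
    else pvRunA true cs

lemma pv_toNat_ofNat (n : Nat) (h : n.isValidChar) : (Char.ofNat n).toNat = n := by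
  unfold Char.ofNat
  rw [dif_pos h]
  simp [Char.ofNatAux, Char.toNat]

lemma pv_le_iff (a b : Char) : a ≤ b ↔ a.toNat ≤ b.toNat := by
  rw [Char.le_def]
  exact UInt32.le_iff_toNat_le

lemma pv_isupper_iff (c : Char) : PySem.Chars.isupper c = true ↔ 65 ≤ c.toNat ∧ c.toNat ≤ 90 := by
  simp [PySem.Chars.isupper, pv_le_iff]

lemma pv_islower_iff (c : Char) : PySem.Chars.islower c = true ↔ 97 ≤ c.toNat ∧ c.toNat ≤ 122 := by
  simp [PySem.Chars.islower, pv_le_iff]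

lemma pv_lower_lower (c : Char) :
    PySem.Chars.lowerChar (PySem.Chars.lowerChar c) = PySem.Chars.lowerChar c := by
  by_cases hu : PySem.Chars.isupper c = true
  · have hb := (pv_isupper_iff c).1 hu
    have ht : (Char.ofNat (c.toNat + 32)).toNat = c.toNat + 32 :=
      pv_toNat_ofNat _ (Or.inl (by omega))
    have h2 : PySem.Chars.isupper (Char.ofNat (c.toNat + 32)) = false := by
      cases hx : PySem.Chars.isupper (Char.ofNat (c.toNat + 32)) with
      | false => rfl
      | true => exact absurd ((pv_isupper_iff _).1 hx) (by rw [ht]; omega)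
    simp [PySem.Chars.lowerChar, hu, h2]
  · simp [PySem.Chars.lowerChar, hu]

lemma pv_lower_upper (c : Char) :
    PySem.Chars.lowerChar (PySem.Chars.upperChar c) = PySem.Chars.lowerChar c := by
  by_cases hl : PySem.Chars.islower c = true
  · have hb := (pv_islower_iff c).1 hl
    have ht : (Char.ofNat (c.toNat - 32)).toNat = c.toNat - 32 :=
      pv_toNat_ofNat _ (Or.inl (by omega))
    have h2 : PySem.Chars.isupper (Char.ofNat (c.toNat - 32)) = true := by
      rw [pv_isupper_iff, ht]; omega
    have h3 : PySem.Chars.isupper c = false := by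
      cases hx : PySem.Chars.isupper c with
      | false => rfl
      | true => exact absurd ((pv_isupper_iff _).1 hx) (by omega)
    have h4 : c.toNat - 32 + 32 = c.toNat := by omega
    simp [PySem.Chars.upperChar, hl, PySem.Chars.lowerChar, h2, h3, ht, h4, Char.ofNat_toNat]
  · simp [PySem.Chars.upperChar, hl]

lemma pv_foldl_runA (cs : List Char) (acc : List Char) (u : Bool) :
    (cs.foldl pvStepA (acc, u)).1 = acc ++ pvRunA u cs := by
  induction cs generalizing acc u with
  | nil => simp [pvRunA]
  | cons c cs ih =>
    by_cases h : PySem.Chars.isalpha c = true <;> cases u <;>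
      simp [pvStepA, h, pvRunA, ih, List.append_assoc]

-- the 'upper' flag resets at each non-letter: splitting at the first alpha run
lemma pv_runA_false (cs : List Char) :
    pvRunA false cs =
      (cs.takeWhile PySem.Chars.isalpha).map PySem.Chars.lowerChar ++
        pvRunA true (cs.dropWhile PySem.Chars.isalpha) := by
  induction cs with
  | nil => simp [pvRunA]
  | cons c cs ih =>
    by_cases h : PySem.Chars.isalpha c = true
    · simp [pvRunA, h, ih]
    · simp [pvRunA, h]

-- B's joined capitalized words equal A's newstring computed with the flag initially set
lemma pv_words_runA : ∀ (n : Nat) (cs : List Char), cs.length ≤ n →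
    (pvWordsB cs).flatMap pvCap = pvRunA true cs := by
  intro n
  induction n with
  | zero =>
    intro cs h
    have : cs = [] := List.eq_nil_of_length_eq_zero (by omega)
    simp [this, pvWordsB, pvRunA]
  | succ n ih =>
    intro cs h
    cases cs with
    | nil => simp [pvWordsB, pvRunA]
    | cons c cs =>
      by_cases hc : PySem.Chars.isalpha c = true
      · have hlen : (cs.dropWhile PySem.Chars.isalpha).length ≤ n := by
          have := List.length_dropWhile_le PySem.Chars.isalpha cs
          simp at h; omega
        simp [pvWordsB, hc, pvRunA, pvCap, ih _ hlen, pv_runA_false]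
      · have hlen : cs.length ≤ n := by simp at h; omega
        simp [pvWordsB, hc, pvRunA, ih _ hlen]

-- A's newstring (flag initially clear) vs B's (flag effectively set): equal, or same
-- tail with a lower- vs upper-cased head — which the final first-char lowering cancels
lemma pv_heads (cs : List Char) :
    pvRunA false cs = pvRunA true cs ∨
      ∃ c t, pvRunA false cs = PySem.Chars.lowerChar c :: t ∧
             pvRunA true cs = PySem.Chars.upperChar c :: t := by
  cases cs with
  | nil => left; rfl
  | cons c cs =>
    by_cases h : PySem.Chars.isalpha c = true
    · right; exact ⟨c, pvRunA false cs, by simp [pvRunA, h], by simp [pvRunA, h]⟩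
    · left; simp [pvRunA, h]

lemma pv_pyGet?_zero_cons {α : Type} (x : α) (t : List α) :
    PySem.List.pyGet? (x :: t) (0 : Int) = some x := by
  simp [pysem]

-- ===== VERDICT (by name: the statement is the Claim_ definition above) =====
theorem camel_case_spec : Claim_equal_camel_case := by
  intro phrase _ _
  unfold Spec_camel_case camel_case camel_case_alt
  have hb : ((PySem.List.pyRange 0 ((phrase.toList).length : Int) 1).foldl
      (fun (st : List Char × Bool) i =>
        let c := PySem.List.pyGetD phrase.toList i ' '
        if PySem.Chars.isalpha c then
          if st.2 then (st.1 ++ [PySem.Chars.upperChar c], false)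
          else (st.1 ++ [PySem.Chars.lowerChar c], false)
        else (st.1, true)) (([] : List Char), false)) =
      (phrase.toList).foldl pvStepA (([] : List Char), false) :=
    PySem.List.foldl_pyRange_zero_pyGetD' phrase.toList ' ' pvStepA (([] : List Char), false)
  simp only [hb, pv_foldl_runA, List.nil_append,
    pv_words_runA (phrase.toList).length phrase.toList le_rfl]
  rcases pv_heads phrase.toList with h | ⟨c, t, h1, h2⟩
  · rw [h]
  · rw [h1, h2, pv_pyGet?_zero_cons, pv_pyGet?_zero_cons]
    simp [PySem.List.slice_from_one, pv_lower_lower, pv_lower_upper]
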